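-- pv_equiv track=rewrite | github.com/alexistli/advent-of-code | 2022/day_01/part_1.py | get_calories_by_elf
-- ===== SOURCE A (Python) =====
-- def get_calories_by_elf(calories_list):
--
--     elf_calories = []
--     for calories in calories_list:
--         if calories == "\n":
--             yield elf_calories
--             elf_calories = []
--             continue
--         elf_calories += [int(calories)]
-- ===== SOURCE B (Python) =====
-- def get_calories_by_elf(calories_list):
--     seq = list(calories_list)
--     parsed = [None if x == "\n" else int(x) for x in seq]
--     start = 0
--     for i, x in enumerate(parsed):
--         if x is None:
--             yield parsed[start:i]
--             start = i + 1
-- ===== Notes on version B (the rewrite author's own statement) =====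
-- stated objective: alternative
-- what changed: Replaces the running accumulator-and-reset generator with a parse-everything-once pass (None marking delimiters) followed by a boundary-index scan over enumerate that yields slices of the parsed list at each delimiter.
import Mathlib
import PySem

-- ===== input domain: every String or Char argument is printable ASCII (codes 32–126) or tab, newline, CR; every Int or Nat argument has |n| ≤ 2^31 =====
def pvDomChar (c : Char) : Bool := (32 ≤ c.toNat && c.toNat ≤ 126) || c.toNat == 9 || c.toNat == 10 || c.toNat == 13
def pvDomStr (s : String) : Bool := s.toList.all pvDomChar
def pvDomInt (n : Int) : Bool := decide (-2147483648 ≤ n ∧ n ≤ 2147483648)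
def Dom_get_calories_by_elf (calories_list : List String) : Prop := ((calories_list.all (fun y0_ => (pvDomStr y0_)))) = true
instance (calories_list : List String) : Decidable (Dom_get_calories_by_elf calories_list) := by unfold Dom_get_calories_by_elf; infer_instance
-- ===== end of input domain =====

-- B replaces A's running accumulator-and-reset generator by a parse-once pass followed by an
-- enumerate scan that slices the parsed list between consecutive delimiter boundaries
-- (alternative decomposition, same cost).


-- ===== PORT A =====
-- state = (yielded groups, current accumulator); 'int(c)' = PySem.Int.ofStr? (the getD 0
-- default is unreachable inside Pre_, where every parsed element is int-like)
def get_calories_by_elf (calories_list : List String) : List (List Int) :=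
  (calories_list.foldl
    (fun (st : List (List Int) × List Int) c =>
      if c = "\n" then (st.1 ++ [st.2], ([] : List Int))
      else (st.1, st.2 ++ [(PySem.Int.ofStr? c).getD 0]))
    (([] : List (List Int)), ([] : List Int))).1

-- ===== PORT B =====
-- parse the whole list once (None marks a delimiter), then scan its enumerate with a start
-- index, yielding the slice parsed[start:i] at each None; '.getD 0' only realizes the Option
-- unwrap of the yielded slice (between boundaries every entry is 'some')
def get_calories_by_elf_alt (calories_list : List String) : List (List Int) :=
  let parsed : List (Option Int) :=
    calories_list.map (fun x => if x = "\n" then none else some ((PySem.Int.ofStr? x).getD 0))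
  ((PySem.List.enumerate parsed 0).foldl
    (fun (st : List (List Int) × Int) (p : Int × Option Int) =>
      if p.2 = none then
        (st.1 ++ [(PySem.List.slice parsed (some st.2) (some p.1)).map (fun o => o.getD 0)],
          p.1 + 1)
      else st)
    (([] : List (List Int)), (0 : Int))).1

-- ===== PRECONDITION & SPEC =====
-- Pre_: exactly the inputs where the Python A returns normally — every element other
-- than "\n" is a valid int() literal (otherwise A raises ValueError; so does B).
def Pre_get_calories_by_elf (calories_list : List String) : Prop :=
  ∀ s ∈ calories_list, s ≠ "\n" → (PySem.Int.ofStr? s).isSome = true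
instance (calories_list : List String) : Decidable (Pre_get_calories_by_elf calories_list) := by unfold Pre_get_calories_by_elf; infer_instance
def pvWitness_get_calories_by_elf : List String := ["1", "\n", "2", "\n"]

def Spec_get_calories_by_elf (calories_list : List String) (out : List (List Int)) : Prop := out = get_calories_by_elf_alt calories_list
instance (calories_list : List String) (out : List (List Int)) : Decidable (Spec_get_calories_by_elf calories_list out) := by unfold Spec_get_calories_by_elf; infer_instance

-- ===== CLAIM (what is proved, stated in full; the proofs are below) =====
def Claim_equal_get_calories_by_elf : Prop := ∀ (calories_list : List String), Dom_get_calories_by_elf calories_list → Pre_get_calories_by_elf calories_list → Spec_get_calories_by_elf calories_list (get_calories_by_elf calories_list)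

-- ===== LEMMAS AND PROOFS =====

-- Loop invariant: processing the suffix seq.drop i, A's current accumulator equals the
-- unwrapped parsed slice seq[start:i] that B will emit at the next delimiter.
theorem pv_main (seq : List String) :
    ∀ (tail : List String) (i start : Nat) (acc : List (List Int)),
      tail = seq.drop i → start ≤ i →
      (tail.foldl
        (fun (st : List (List Int) × List Int) c =>
          if c = "\n" then (st.1 ++ [st.2], ([] : List Int))
          else (st.1, st.2 ++ [(PySem.Int.ofStr? c).getD 0]))
        (acc, ((seq.drop start).take (i - start)).map
          (fun c => if c = "\n" then 0 else (PySem.Int.ofStr? c).getD 0))).1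
      =
      ((PySem.List.enumerate (tail.map
          (fun x => if x = "\n" then none else some ((PySem.Int.ofStr? x).getD 0))) (i : Int)).foldl
        (fun (st : List (List Int) × Int) (p : Int × Option Int) =>
          if p.2 = none then
            (st.1 ++ [(PySem.List.slice (seq.map
                (fun x => if x = "\n" then none else some ((PySem.Int.ofStr? x).getD 0)))
                (some st.2) (some p.1)).map (fun o => o.getD 0)],
              p.1 + 1)
          else st)
        (acc, (start : Int))).1 := by
  intro tail
  induction tail with
  | nil => intro i start acc _ _; simp
  | cons c rest ih =>
    intro i start acc hdrop hle
    have hget : seq[i]? = some c := by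
      have h : (List.drop i seq)[0]? = some c := by rw [← hdrop]; rfl
      rw [List.getElem?_drop] at h
      simpa using h
    have hrest : rest = seq.drop (i + 1) := by
      have h : List.drop 1 (List.drop i seq) = rest := by rw [← hdrop]; rfl
      rw [List.drop_drop] at h
      exact h.symm
    rw [List.map_cons, PySem.List.enumerate_cons]
    have hslice : PySem.List.slice (seq.map
          (fun x => if x = "\n" then none else some ((PySem.Int.ofStr? x).getD 0)))
          (some (start : Int)) (some (i : Int))
        = ((seq.drop start).take (i - start)).map
          (fun x => if x = "\n" then none else some ((PySem.Int.ofStr? x).getD 0)) := by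
      rw [PySem.List.slice_natCast, ← List.map_drop, ← List.map_take]
    have hunwrap : (((seq.drop start).take (i - start)).map
          (fun x => if x = "\n" then none else some ((PySem.Int.ofStr? x).getD 0))).map
          (fun o : Option Int => o.getD 0)
        = ((seq.drop start).take (i - start)).map
          (fun c => if c = "\n" then 0 else (PySem.Int.ofStr? c).getD 0) := by
      rw [List.map_map]
      refine List.map_congr_left (fun x _ => ?_)
      by_cases hx : x = "\n" <;> simp [hx]
    have hfun : ((fun o : Option Int => o.getD 0) ∘
          (fun x : String => if x = "\n" then none else some ((PySem.Int.ofStr? x).getD 0)))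
        = (fun c : String => if c = "\n" then 0 else (PySem.Int.ofStr? c).getD 0) := by
      funext x; by_cases hx : x = "\n" <;> simp [hx]
    by_cases hc : c = "\n"
    · subst hc
      have IH := ih (i + 1) (i + 1)
        (acc ++ [((seq.drop start).take (i - start)).map
          (fun c => if c = "\n" then 0 else (PySem.Int.ofStr? c).getD 0)])
        hrest le_rfl
      simp only [Nat.sub_self, List.take_zero, List.map_nil] at IH
      push_cast at IH
      simpa [hslice, hunwrap, hfun] using IH
    · have hstep : (seq.drop start).take (i + 1 - start)
          = (seq.drop start).take (i - start) ++ [c] := by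
        have h1 : i + 1 - start = (i - start) + 1 := by omega
        rw [h1, List.take_add_one]
        have h2 : (seq.drop start)[i - start]? = some c := by
          rw [List.getElem?_drop]
          have h3 : start + (i - start) = i := by omega
          rw [h3, hget]
        simp [h2]
      have IH := ih (i + 1) start acc hrest (by omega)
      rw [hstep] at IH
      push_cast at IH
      simp only [List.map_append, List.map_cons, List.map_nil] at IH
      simp only [if_neg hc] at IH
      simpa [hc] using IH

-- ===== VERDICT (by name: the statement is the Claim_ definition above) =====
theorem get_calories_by_elf_spec : Claim_equal_get_calories_by_elf := by
  intro xs _ _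
  unfold Spec_get_calories_by_elf get_calories_by_elf get_calories_by_elf_alt
  have := pv_main xs xs 0 0 [] (by simp) (le_refl _)
  simpa using this
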